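-- pv_equiv track=rewrite | github.com/Keypirinha/SDK | tools/lib/kpsdk/_utils.py | validate_package_name
-- ===== SOURCE A (Python) =====
-- def validate_package_name(name):
--     """
--     Check if the given name is compliant to Keypirinha's package naming rules
--     and return a boolean.
--
--     **CAUTION:** this function should just serve an informational purpose as it
--     may not be up-to-date with current Keypirinha release.
--     """
--     ascii_alnum = "0123456789abcdefghijklmnopqrstuvwxyz" # str.isalnum() is unicode-compliant
--     extra_chars = "-+=_#@()[]{}"
--     name_lc = name.lower()
--
--     if not isinstance(name, str):
--         raise TypeError("package name not a str")
--     if not (3 <= len(name) <= 50):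
--         return False
--     if name_lc[0] not in ascii_alnum or name_lc[-1] not in ascii_alnum:
--         return False
--
--     if "keypirinha" in name_lc:
--         return False
--
--     lastc = ""
--     for c in name_lc:
--         if c in extra_chars:
--             if lastc in extra_chars:
--                 return False
--         elif c not in ascii_alnum:
--             return False
--         lastc = c
--
--     if name_lc in (
--             "keypirinha", "all", "app", "application", "builtin", "builtins",
--             "cache", "data", "default", "env", "extern", "external", "hook",
--             "icon", "image", "intern", "internal", "kpsdk", "local", "locale",
--             "main", "name", "nil", "none", "null", "official", "package",
--             "plugin", "python", "res", "resource", "sdk", "temp", "theme",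
--             "tmp", "type", "script", "user", "var"):
--         return False
--
--     return True
-- ===== SOURCE B (Python) =====
-- _RESERVED = frozenset(
--     "keypirinha all app application builtin builtins cache data default env "
--     "extern external hook icon image intern internal kpsdk local locale main "
--     "name nil none null official package plugin python res resource sdk temp "
--     "theme tmp type script user var".split())
--
-- def validate_package_name(name):
--     name_lc = name.lower()  # before the isinstance check, as in the original
--     if not isinstance(name, str):
--         raise TypeError("package name not a str")
--     if not (3 <= len(name) <= 50):
--         return False
--     # One DFA pass replaces A's four separate checks (first char, last char,
--     # character repertoire, no two adjacent extra chars):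
--     # states: 0 start, 1 after-alnum (accepting), 2 after-extra, 3 dead
--     state = 0
--     for c in name_lc:
--         if c in "0123456789abcdefghijklmnopqrstuvwxyz" and state != 3:
--             state = 1
--         elif c in "-+=_#@()[]{}" and state == 1:
--             state = 2
--         else:
--             state = 3
--     return state == 1 and "keypirinha" not in name_lc and name_lc not in _RESERVED
-- ===== Notes on version B (the rewrite author's own statement) =====
-- stated objective: alternative
-- what changed: A's four separate structural checks (first char, last char, stateful allowed/adjacency loop over a lastc accumulator) are replaced by a single 4-state DFA pass whose accepting state encodes all of them at once, with the reserved names held in a frozenset built from one split string.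
import Mathlib
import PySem

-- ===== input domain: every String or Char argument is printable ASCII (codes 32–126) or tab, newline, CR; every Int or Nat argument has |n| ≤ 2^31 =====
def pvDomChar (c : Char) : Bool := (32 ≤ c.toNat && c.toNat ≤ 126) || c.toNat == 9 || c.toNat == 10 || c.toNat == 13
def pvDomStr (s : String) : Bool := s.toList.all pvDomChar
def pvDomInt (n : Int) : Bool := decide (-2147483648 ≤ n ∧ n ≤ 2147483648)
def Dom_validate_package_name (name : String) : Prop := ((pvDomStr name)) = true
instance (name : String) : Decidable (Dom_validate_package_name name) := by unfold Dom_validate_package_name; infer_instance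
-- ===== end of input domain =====

-- B replaces A's four separate structural checks (first char, last char, and the stateful
-- allowed/adjacency loop over a `lastc` accumulator) by ONE 4-state DFA pass whose accepting
-- state encodes them all (objective: alternative). The isinstance(name, str) guard of the
-- Python is vacuous under the type convention (name : String).

-- ===== PORT A =====
def pvAlnum : List Char := "0123456789abcdefghijklmnopqrstuvwxyz".toList
def pvExtra : List Char := "-+=_#@()[]{}".toList
def pvReserved : List String :=
  ["keypirinha", "all", "app", "application", "builtin", "builtins",
   "cache", "data", "default", "env", "extern", "external", "hook",
   "icon", "image", "intern", "internal", "kpsdk", "local", "locale",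
   "main", "name", "nil", "none", "null", "official", "package",
   "plugin", "python", "res", "resource", "sdk", "temp", "theme",
   "tmp", "type", "script", "user", "var"]

-- A's for-loop: lastc starts as "" and Python's '"" in extra_chars' is True,
-- so `none` (standing for lastc = "") counts as "in extra_chars".
def vpnLoop (lastc : Option Char) (cs : List Char) : Bool :=
  match cs with
  | [] => true
  | c :: rest =>
    if pvExtra.contains c then
      if (match lastc with | none => true | some l => pvExtra.contains l) then false
      else vpnLoop (some c) rest
    else if !(pvAlnum.contains c) then false
    else vpnLoop (some c) rest

def validate_package_name (name : String) : Bool :=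
  let name_lc := PySem.Str.lower name
  if !(3 ≤ PySem.Str.len name && PySem.Str.len name ≤ 50) then false
  else
    -- name_lc[0] / name_lc[-1]; with the length guard both indexings succeed in Python
    match PySem.Str.pyGet? name_lc 0, PySem.Str.pyGet? name_lc (-1) with
    | some c0, some cl =>
      if !(pvAlnum.contains c0) || !(pvAlnum.contains cl) then false
      else if PySem.Str.isIn "keypirinha" name_lc then false
      else if !(vpnLoop none name_lc.toList) then false
      else if pvReserved.contains name_lc then false
      else true
    | _, _ => false

-- ===== PORT B =====
-- the reserved frozenset, built from one space-separated literal as in Source B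
def bReserved : PySem.Set String := PySem.Set.ofList (PySem.Str.split₀
  ("keypirinha all app application builtin builtins cache data default env " ++
   "extern external hook icon image intern internal kpsdk local locale main " ++
   "name nil none null official package plugin python res resource sdk temp " ++
   "theme tmp type script user var"))

-- DFA transition; Python's single-char 'c in <literal>' is character membership.
-- States: 0 start, 1 after-alnum (accepting), 2 after-extra, 3 dead.
def bStep (st : Nat) (c : Char) : Nat :=
  if "0123456789abcdefghijklmnopqrstuvwxyz".toList.contains c && st != 3 then 1
  else if "-+=_#@()[]{}".toList.contains c && st == 1 then 2
  else 3

def validate_package_name_alt (name : String) : Bool :=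
  let name_lc := PySem.Str.lower name
  if !(3 ≤ PySem.Str.len name && PySem.Str.len name ≤ 50) then false
  else
    (name_lc.toList.foldl bStep 0 == 1)
      && !(PySem.Str.isIn "keypirinha" name_lc)
      && !(bReserved.contains name_lc)

-- ===== PRECONDITION & SPEC =====
def Spec_validate_package_name (name : String) (out : Bool) : Prop := out = validate_package_name_alt name
instance (name : String) (out : Bool) : Decidable (Spec_validate_package_name name out) := by unfold Spec_validate_package_name; infer_instance

-- ===== CLAIM (what is proved, stated in full; the proofs are below) =====
def Claim_equal_validate_package_name : Prop := ∀ (name : String), Dom_validate_package_name name → Spec_validate_package_name name (validate_package_name name)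

-- ===== LEMMAS AND PROOFS =====

theorem bStep_alnum_eq : "0123456789abcdefghijklmnopqrstuvwxyz".toList = pvAlnum := rfl
theorem bStep_extra_eq : "-+=_#@()[]{}".toList = pvExtra := rfl

-- B's split-string frozenset holds exactly A's reserved tuple
theorem reserved_eq : bReserved = pvReserved := by
  set_option maxRecDepth 10000 in decide

theorem extra_not_alnum : ∀ c : Char, c ∈ pvExtra → c ∉ pvAlnum := by
  intro c h
  simp [pvExtra] at h
  rcases h with rfl|rfl|rfl|rfl|rfl|rfl|rfl|rfl|rfl|rfl|rfl|rfl <;> decide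

-- the dead state of B's DFA is absorbing
theorem foldl_bStep_dead (cs : List Char) : cs.foldl bStep 3 = 3 := by
  induction cs with
  | nil => rfl
  | cons c rest ih => simpa [bStep] using ih

-- B's DFA from a live state vs A's loop, tracking the alnum-ness of the last character
theorem foldl_bStep_live (cs : List Char) : ∀ (l : Char),
    (l ∈ pvAlnum → ((cs.foldl bStep 1 == 1) =
        (vpnLoop (some l) cs && pvAlnum.contains ((cs.getLast?).getD l)))) ∧
    (l ∈ pvExtra → ((cs.foldl bStep 2 == 1) =
        (vpnLoop (some l) cs && pvAlnum.contains ((cs.getLast?).getD l)))) := by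
  induction cs with
  | nil =>
    intro l
    constructor
    · intro hl; simp [vpnLoop, hl]
    · intro hl; simp [vpnLoop, extra_not_alnum l hl]
  | cons c rest ih =>
    intro l
    have hlast : ∀ x : Char, ((c :: rest).getLast?).getD x = (rest.getLast?).getD c := by
      intro x
      cases rest with
      | nil => rfl
      | cons d tl =>
        obtain ⟨y, hy⟩ := Option.isSome_iff_exists.mp (by simp : ((d :: tl).getLast?).isSome)
        simp [hy]
    by_cases hc : c ∈ pvAlnum
    · have hce : c ∉ pvExtra := fun h => extra_not_alnum c h hc
      have hstep1 : bStep 1 c = 1 := by simp [bStep, bStep_alnum_eq, hc]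
      have hstep2 : bStep 2 c = 1 := by simp [bStep, bStep_alnum_eq, hc]
      constructor
      · intro hl
        simp only [List.foldl_cons, hstep1]
        simpa [vpnLoop, hce, hc, hlast] using (ih c).1 hc
      · intro hl
        simp only [List.foldl_cons, hstep2]
        simpa [vpnLoop, hce, hc, hlast] using (ih c).1 hc
    · by_cases hcx : c ∈ pvExtra
      · have hstep1 : bStep 1 c = 2 := by
          simp [bStep, bStep_alnum_eq, bStep_extra_eq, hc, hcx]
        have hstep2 : bStep 2 c = 3 := by
          simp [bStep, bStep_alnum_eq, bStep_extra_eq, hc, hcx]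
        constructor
        · intro hl
          have hle : l ∉ pvExtra := fun h => extra_not_alnum l h hl
          simp only [List.foldl_cons, hstep1]
          simpa [vpnLoop, hcx, hle, hlast] using (ih c).2 hcx
        · intro hl
          simp [List.foldl_cons, hstep2, foldl_bStep_dead, vpnLoop, hcx, hl]
      · have hstep : ∀ st, bStep st c = 3 := by
          intro st; simp [bStep, bStep_alnum_eq, bStep_extra_eq, hc, hcx]
        constructor <;> intro hl <;>
          simp [List.foldl_cons, hstep, foldl_bStep_dead, vpnLoop, hcx, hc]

-- ===== VERDICT (by name: the statement is the Claim_ definition above) =====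
theorem validate_package_name_spec : Claim_equal_validate_package_name := by
  intro name _
  unfold Spec_validate_package_name validate_package_name validate_package_name_alt
  simp only []
  by_cases hlen : (3 ≤ PySem.Str.len name && PySem.Str.len name ≤ 50) = true
  · simp only [hlen, Bool.not_true, Bool.false_eq_true, ite_false]
    cases hcs : (PySem.Str.lower name).toList with
    | nil => simp [hcs, PySem.List.pyGet?]
    | cons c0 tl =>
      cases hl : (c0 :: tl).getLast? with
      | none => simp at hl
      | some cl =>
        by_cases hc0 : c0 ∈ pvAlnum
        · have hce : c0 ∉ pvExtra := fun h => extra_not_alnum c0 h hc0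
          have hstep0 : bStep 0 c0 = 1 := by simp [bStep, bStep_alnum_eq, hc0]
          have hfold : ((c0 :: tl).foldl bStep 0 == 1) =
              (vpnLoop none (c0 :: tl) && pvAlnum.contains cl) := by
            have h1 := (foldl_bStep_live tl c0).1 hc0
            have hlast : (tl.getLast?).getD c0 = cl := by
              cases tl with
              | nil => simp at hl; simp [hl]
              | cons d tl' => simp [List.getLast?_cons_cons] at hl ⊢; simp [hl]
            simp only [List.foldl_cons, hstep0, h1, hlast, vpnLoop]
            simp [hce, hc0]
          simp [hcs, PySem.List.pyGet?_neg_one, hl, reserved_eq, hc0]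
          by_cases h1 : pvAlnum.contains cl = true <;>
          by_cases h2 : PySem.Str.isIn "keypirinha" (PySem.Str.lower name) = true <;>
          by_cases h3 : vpnLoop none (c0 :: tl) = true <;>
          by_cases h4 : pvReserved.contains (PySem.Str.lower name) = true <;>
            simp_all
        · have hstep0 : bStep 0 c0 = 3 := by
            simp [bStep, bStep_alnum_eq, bStep_extra_eq, hc0]
          have hfold : (c0 :: tl).foldl bStep 0 = 3 := by
            simp [List.foldl_cons, hstep0, foldl_bStep_dead]
          simp [hcs, PySem.List.pyGet?_neg_one, hl, hc0, hfold]
  · simp only [Bool.not_eq_true] at hlen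
    simp only [hlen, Bool.not_false, if_true]
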